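-- pv_equiv track=rewrite | github.com/basantab/NTF2analysis | feature_extraction/fragment_features/get_loop_frag_qual.py | ProcessSS
-- ===== SOURCE A (Python) =====
-- def ProcessSS(input_ss):
-- 	'''
-- 	Return a dictionary where keys are H, E and L, and values are lists of indexes where elements start and end.
-- 	E.g.: 'E':[ [1,7], [14,19] ] there are two strands, one starts at index 1 and ends at 7, and the other one starts at 14 and
-- 	ends at 19.
-- 	'''
-- 	ss_string = list(input_ss)
-- 	container_dict = {'E':[],'H':[],'L':[]}
-- 	switch = False
-- 	index_container = [0,0]
-- 	for i,n_pos in enumerate(ss_string):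
-- 		prev_index = max(i-1,0)
-- 		prev = ss_string[prev_index]
-- 		if prev != n_pos: switch = True
-- 		else: switch = False
-- 		if switch:
-- 			container_dict[prev].append(index_container)
-- 			index_container = [i,i]
-- 		else: index_container = [ index_container[0],i ]
-- 		if ( i == len(ss_string) - 1 ):
-- 			index_container = [ index_container[0],i ]
-- 			container_dict[n_pos].append(index_container)
-- 	return container_dict
-- ===== SOURCE B (Python) =====
-- def ProcessSS(input_ss):
-- 	'''
-- 	Return a dictionary where keys are H, E and L, and values are lists of indexes where elements start and end.
-- 	Two-pointer scan: each outer step consumes one whole run of equal characters.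
-- 	'''
-- 	container_dict = {'E': [], 'H': [], 'L': []}
-- 	n = len(input_ss)
-- 	i = 0
-- 	while i < n:
-- 		j = i
-- 		while j + 1 < n and input_ss[j + 1] == input_ss[i]:
-- 			j += 1
-- 		container_dict[input_ss[i]].append([i, j])
-- 		i = j + 1
-- 	return container_dict
-- ===== Notes on version B (the rewrite author's own statement) =====
-- stated objective: simpler
-- what changed: Replaced A's per-character prev/switch state machine (carrying a mutable index_container and a last-index special case) with a two-pointer while loop that consumes one whole run of equal characters per outer step and appends its [start,end] directly.
import Mathlib
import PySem

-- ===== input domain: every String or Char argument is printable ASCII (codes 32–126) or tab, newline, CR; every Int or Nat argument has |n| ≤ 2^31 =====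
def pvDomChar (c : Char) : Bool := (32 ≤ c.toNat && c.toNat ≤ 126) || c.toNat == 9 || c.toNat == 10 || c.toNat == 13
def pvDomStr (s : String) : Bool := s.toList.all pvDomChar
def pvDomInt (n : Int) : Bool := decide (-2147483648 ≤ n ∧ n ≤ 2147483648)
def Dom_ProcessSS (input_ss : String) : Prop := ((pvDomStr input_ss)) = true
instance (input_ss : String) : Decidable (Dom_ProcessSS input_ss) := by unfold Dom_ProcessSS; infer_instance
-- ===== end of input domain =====

-- B replaces A's per-character prev/switch state machine by a simpler two-pointer
-- run scan (one outer step per run of equal characters); same O(n) cost.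


-- ===== PORT A =====
-- the loop body of A's 'for i,n_pos in enumerate(ss_string)'; state = (container_dict, switch, index_container).
-- ss_string[prev_index] is always in range inside the loop, so the .getD default is never used;
-- 'container_dict[prev].append' raises KeyError for keys outside E/H/L (ported as Dict.modify; those inputs are outside Pre_).
def ProcessSS_step (ss_string : List Char)
    (st : PySem.Dict String (List (List Int)) × Bool × List Int) (p : Int × Char) :
    PySem.Dict String (List (List Int)) × Bool × List Int :=
  let d := st.1
  let ic := st.2.2
  let i := p.1
  let n_pos := p.2
  let prev_index := max (i - 1) 0
  let prev := (PySem.List.pyGet? ss_string prev_index).getD n_pos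
  let switch := prev != n_pos
  let (d2, ic2) :=
    if switch then (d.modify prev.toString [] (· ++ [ic]), [i, i])
    else (d, [(PySem.List.pyGet? ic 0).getD 0, i])
  if i == (ss_string.length : Int) - 1 then
    let ic3 := [(PySem.List.pyGet? ic2 0).getD 0, i]
    (d2.modify n_pos.toString [] (· ++ [ic3]), switch, ic3)
  else (d2, switch, ic2)

def ProcessSS (input_ss : String) : List (String × List (List Int)) :=
  let ss_string := input_ss.toList
  let container_dict : PySem.Dict String (List (List Int)) :=
    PySem.Dict.ofList [("E", []), ("H", []), ("L", [])]
  ((PySem.List.enumerate ss_string 0).foldl (ProcessSS_step ss_string)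
    (container_dict, false, ([0, 0] : List Int))).1.items

-- ===== PORT B =====
-- inner 'while j + 1 < n and input_ss[j+1] == input_ss[i]': how far j advances past i
def ProcessSS_altRun (c : Char) : List Char → Nat
  | [] => 0
  | x :: xs => if x == c then ProcessSS_altRun c xs + 1 else 0

-- outer 'while i < n' of B: one step per run of equal characters
def ProcessSS_altLoop (d : PySem.Dict String (List (List Int))) (chars : List Char) (i : Int) :
    PySem.Dict String (List (List Int)) :=
  match chars with
  | [] => d
  | c :: rest =>
    let k := ProcessSS_altRun c rest
    ProcessSS_altLoop (d.modify c.toString [] (· ++ [[i, i + (k : Int)]])) (rest.drop k) (i + (k : Int) + 1)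
termination_by chars.length
decreasing_by simp [List.length_drop]

def ProcessSS_alt (input_ss : String) : List (String × List (List Int)) :=
  (ProcessSS_altLoop (PySem.Dict.ofList [("E", []), ("H", []), ("L", [])]) input_ss.toList 0).items

-- ===== PRECONDITION & SPEC =====
-- Pre_ excludes exactly the strings containing a character other than E/H/L, on which A raises KeyError.
def Pre_ProcessSS (input_ss : String) : Prop :=
  input_ss.toList.all (fun c => c == 'E' || c == 'H' || c == 'L') = true
instance (input_ss : String) : Decidable (Pre_ProcessSS input_ss) := by unfold Pre_ProcessSS; infer_instance

def pvWitness_ProcessSS : String := "LEEHHHL"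

def Spec_ProcessSS (input_ss : String) (out : List (String × List (List Int))) : Prop := out = ProcessSS_alt input_ss
instance (input_ss : String) (out : List (String × List (List Int))) : Decidable (Spec_ProcessSS input_ss out) := by unfold Spec_ProcessSS; infer_instance

-- ===== CLAIM (what is proved, stated in full; the proofs are below) =====
def Claim_equal_ProcessSS : Prop := ∀ (input_ss : String), Dom_ProcessSS input_ss → Pre_ProcessSS input_ss → Spec_ProcessSS input_ss (ProcessSS input_ss)

-- ===== LEMMAS AND PROOFS =====

-- A's loop rewritten with the previous character and the two index_container cells carried explicitly
def recA (n : Int) (d : PySem.Dict String (List (List Int))) (a b : Int) (prev : Char) (s : Int) :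
    List Char → PySem.Dict String (List (List Int))
  | [] => d
  | c :: rest =>
    let switch := prev != c
    let (d2, a2, _b2) :=
      if switch then (d.modify prev.toString [] (· ++ [[a, b]]), s, s)
      else (d, a, s)
    let d3 :=
      if s == n - 1 then d2.modify c.toString [] (· ++ [[a2, s]])
      else d2
    recA n d3 a2 s c (s + 1) rest

lemma bridge (ss : List Char) :
    ∀ (rest pre : List Char) (hpre : pre ≠ []) (_hss : ss = pre ++ rest)
      (d : PySem.Dict String (List (List Int))) (sw : Bool) (a b : Int),
    ((PySem.List.enumerate rest (pre.length : Int)).foldl (ProcessSS_step ss) (d, sw, [a, b])).1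
      = recA (ss.length : Int) d a b (pre.getLast hpre) (pre.length : Int) rest := by
  intro rest
  induction rest with
  | nil => intros; simp [PySem.List.enumerate, recA]
  | cons c rest' ih =>
    intro pre hpre hss d sw a b
    rw [PySem.List.enumerate_cons, List.foldl_cons]
    have hlen : 1 ≤ pre.length := List.length_pos_of_ne_nil hpre
    have hmax : max ((pre.length : Int) - 1) 0 = ((pre.length - 1 : Nat) : Int) := by
      push_cast [hlen]; omega
    have hget : PySem.List.pyGet? ss (max ((pre.length : Int) - 1) 0) = some (pre.getLast hpre) := by
      rw [hmax, PySem.List.pyGet?_natCast, hss]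
      rw [List.getElem?_append_left (by omega)]
      rw [List.getElem?_eq_getElem (by omega)]
      rw [List.getLast_eq_getElem]
    have hstep : ProcessSS_step ss (d, sw, [a, b]) ((pre.length : Int), c) =
        (let switch := pre.getLast hpre != c
         let (d2, a2, _b2) :=
           if switch then (d.modify (pre.getLast hpre).toString [] (· ++ [[a, b]]), (pre.length:Int), (pre.length:Int))
           else (d, a, (pre.length:Int))
         let d3 :=
           if (pre.length:Int) == (ss.length : Int) - 1 then d2.modify c.toString [] (· ++ [[a2, (pre.length:Int)]])
           else d2
         (d3, switch, [a2, (pre.length:Int)])) := by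
      simp only [ProcessSS_step, hget]
      by_cases hpc : pre.getLast hpre = c <;>
        by_cases hI : (pre.length : Int) = (ss.length : Int) - 1 <;>
          simp [hpc, hI, PySem.List.pyGet?, PySem.List.pyIdx?]
    rw [hstep, recA]
    have hne : pre ++ [c] ≠ [] := by simp
    have h2 := ih (pre ++ [c]) hne (by simp [hss])
    rw [List.getLast_concat] at h2
    have hl2 : ((pre ++ [c]).length : Int) = (pre.length : Int) + 1 := by simp
    rw [hl2] at h2
    by_cases hpc : pre.getLast hpre = c <;>
      by_cases hI : (pre.length : Int) = (ss.length : Int) - 1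
    · have hswb : (pre.getLast hpre != c) = false := by simp [hpc]
      have hIb : ((pre.length : Int) == (ss.length : Int) - 1) = true := by simp [hI]
      simp only [hswb, hIb, Bool.false_eq_true, if_false, if_true]
      exact h2 _ _ _ _
    · have hswb : (pre.getLast hpre != c) = false := by simp [hpc]
      have hIb : ((pre.length : Int) == (ss.length : Int) - 1) = false := by simp [hI]
      simp only [hswb, hIb, Bool.false_eq_true, if_false]
      exact h2 _ _ _ _
    · have hswb : (pre.getLast hpre != c) = true := by simp [hpc]
      have hIb : ((pre.length : Int) == (ss.length : Int) - 1) = true := by simp [hI]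
      simp only [hswb, hIb, if_true]
      exact h2 _ _ _ _
    · have hswb : (pre.getLast hpre != c) = true := by simp [hpc]
      have hIb : ((pre.length : Int) == (ss.length : Int) - 1) = false := by simp [hI]
      simp only [hswb, hIb, Bool.false_eq_true, if_false, if_true]
      exact h2 _ _ _ _

lemma recA_eq_altLoop :
    ∀ (l : List Char), l ≠ [] → ∀ (n : Int) (d : PySem.Dict String (List (List Int)))
      (a b : Int) (c : Char) (s : Int), n = s + l.length →
    recA n d a b c s l =
      ProcessSS_altLoop
        (d.modify c.toString [] (· ++
          [[a, if ProcessSS_altRun c l = 0 then b else s + (ProcessSS_altRun c l : Int) - 1]]))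
        (l.drop (ProcessSS_altRun c l)) (s + (ProcessSS_altRun c l : Int)) := by
  intro l
  induction l with
  | nil => intro h; exact absurd rfl h
  | cons c' rest ih =>
    intro _ n d a b c s hn
    simp only [List.length_cons] at hn
    by_cases hc : c' = c
    · subst hc
      have hk : ProcessSS_altRun c' (c' :: rest) = ProcessSS_altRun c' rest + 1 := by
        simp [ProcessSS_altRun]
      rcases eq_or_ne rest [] with hr | hr
      · subst hr
        have hs : (s == n - 1) = true := by simp at hn ⊢; omega
        simp [recA, hs, ProcessSS_altRun, ProcessSS_altLoop]
      · have hs : (s == n - 1) = false := by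
          have : 0 < rest.length := List.length_pos_of_ne_nil hr
          simp; omega
        rw [recA]
        simp only [bne_self_eq_false, hs, Bool.false_eq_true, if_false]
        rw [ih hr n d a s c' (s+1) (by push_cast at hn ⊢; omega)]
        rw [hk]
        have hE : (if ProcessSS_altRun c' rest = 0 then s else s + 1 + (ProcessSS_altRun c' rest : Int) - 1)
            = s + (ProcessSS_altRun c' rest : Int) := by split <;> omega
        have hE2 : (if ProcessSS_altRun c' rest + 1 = 0 then b else s + ((ProcessSS_altRun c' rest + 1 : Nat) : Int) - 1)
            = s + (ProcessSS_altRun c' rest : Int) := by split <;> omega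
        rw [hE, hE2]
        push_cast
        ring_nf
        simp [Nat.add_comm 1 (ProcessSS_altRun c' rest), List.drop_succ_cons]
    · have hk : ProcessSS_altRun c (c' :: rest) = 0 := by simp [ProcessSS_altRun, hc]
      have hsw : (c != c') = true := by simp [bne]; exact fun h => hc h.symm
      rcases eq_or_ne rest [] with hr | hr
      · subst hr
        have hs : (s == n - 1) = true := by simp at hn ⊢; omega
        rw [recA]
        simp only [hsw, hs, if_true]
        simp [recA, ProcessSS_altRun, ProcessSS_altLoop, hc]
      · have hs : (s == n - 1) = false := by
          have : 0 < rest.length := List.length_pos_of_ne_nil hr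
          simp; omega
        rw [recA]
        simp only [hsw, hs, Bool.false_eq_true, if_false, if_true]
        rw [ih hr n (d.modify c.toString [] (· ++ [[a, b]])) s s c' (s+1) (by push_cast at hn ⊢; omega)]
        rw [hk]
        have hE : (if ProcessSS_altRun c' rest = 0 then s else s + 1 + (ProcessSS_altRun c' rest : Int) - 1)
            = s + (ProcessSS_altRun c' rest : Int) := by split <;> omega
        rw [hE]
        rw [show ProcessSS_altLoop (d.modify c.toString [] (· ++ [[a, if (0:Nat) = 0 then b else s + ((0:Nat) : Int) - 1]])) ((c' :: rest).drop 0) (s + ((0:Nat) : Int)) = ProcessSS_altLoop (d.modify c.toString [] (· ++ [[a, b]])) (c' :: rest) s from by norm_num]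
        rw [ProcessSS_altLoop]
        ring_nf


-- ===== VERDICT (by name: the statement is the Claim_ definition above) =====
theorem ProcessSS_spec : Claim_equal_ProcessSS := by
  unfold Claim_equal_ProcessSS
  intro s _ _
  unfold Spec_ProcessSS ProcessSS ProcessSS_alt
  cases hss : s.toList with
  | nil => simp [PySem.List.enumerate, ProcessSS_altLoop]
  | cons c rest =>
    show ((PySem.List.enumerate (c :: rest) 0).foldl (ProcessSS_step (c :: rest))
          (PySem.Dict.ofList [("E", []), ("H", []), ("L", [])], false, ([0, 0] : List Int))).1.items
        = (ProcessSS_altLoop (PySem.Dict.ofList [("E", []), ("H", []), ("L", [])]) (c :: rest) 0).items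
    rw [PySem.List.enumerate_cons, List.foldl_cons]
    rcases eq_or_ne rest [] with hr | hr
    · subst hr
      simp [ProcessSS_step, ProcessSS_altLoop, ProcessSS_altRun,
        PySem.List.pyGet?, PySem.List.pyIdx?]
    · have hlen : 1 ≤ rest.length := List.length_pos_of_ne_nil hr
      have hstep1 : ProcessSS_step (c :: rest)
          (PySem.Dict.ofList [("E", []), ("H", []), ("L", [])], false, ([0, 0] : List Int)) (0, c)
          = (PySem.Dict.ofList [("E", []), ("H", []), ("L", [])], false, ([0, 0] : List Int)) := by
        simp [ProcessSS_step, PySem.List.pyGet?, PySem.List.pyIdx?]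
        intro h
        exfalso
        omega
      rw [hstep1]
      norm_num
      have hb := bridge (c :: rest) rest [c] (by simp) (by simp)
        (PySem.Dict.ofList [("E", []), ("H", []), ("L", [])]) false 0 0
      have h1 : (([c] : List Char).length : Int) = 1 := by simp
      rw [h1, List.getLast_singleton] at hb
      rw [hb]
      rw [recA_eq_altLoop rest hr _ _ 0 0 c 1 (by rw [List.length_cons]; push_cast; omega)]
      rw [ProcessSS_altLoop]
      have hE : (if ProcessSS_altRun c rest = 0 then (0 : Int)
            else 1 + (ProcessSS_altRun c rest : Int) - 1) = (ProcessSS_altRun c rest : Int) := by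
        split <;> omega
      rw [hE]
      have hi1 : (1 : Int) + (ProcessSS_altRun c rest : Int)
          = 0 + (ProcessSS_altRun c rest : Int) + 1 := by ring
      have hi0 : (0 : Int) + (ProcessSS_altRun c rest : Int) = (ProcessSS_altRun c rest : Int) := by ring
      rw [hi1, hi0]
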